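-- pv_equiv track=rewrite | github.com/Madaspe/problems | ege_problem_24/24_1/2.py | count
-- ===== SOURCE A (Python) =====
-- def count(string):
--     len_current = 0
--     len_max = 0
--     for char in string:
--         if char in ['C', 'F']:
--             len_current = 0
--             continue
--         len_current += 1
--         len_max = max(len_current, len_max)
--     return len_max
-- ===== SOURCE B (Python) =====
-- def count(string):
--     # partition on the delimiters C/F, then take the longest piece
--     return max(map(len, string.replace('F', 'C').split('C')))
-- ===== Notes on version B (the rewrite author's own statement) =====
-- stated objective: idiomatic
-- what changed: A's running-counter/running-max character loop is replaced by a build-then-reduce pipeline: partition the string on the two delimiter characters (replace one into the other, then split) and take the maximum segment length.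
import Mathlib
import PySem

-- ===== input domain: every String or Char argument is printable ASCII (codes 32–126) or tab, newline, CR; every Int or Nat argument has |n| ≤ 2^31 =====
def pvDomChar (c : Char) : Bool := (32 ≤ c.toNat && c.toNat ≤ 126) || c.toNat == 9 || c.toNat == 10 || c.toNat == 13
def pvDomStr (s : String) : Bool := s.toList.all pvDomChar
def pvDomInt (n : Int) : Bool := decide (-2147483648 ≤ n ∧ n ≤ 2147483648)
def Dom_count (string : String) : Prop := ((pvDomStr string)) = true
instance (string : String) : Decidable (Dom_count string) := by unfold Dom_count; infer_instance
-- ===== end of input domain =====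

-- B replaces A's running-counter/running-max loop by partitioning the string on C/F and taking the max segment length (idiomatic build-then-reduce).


-- ===== PORT A =====
def countLoop : List Char → Int → Int → Int
  | [], _, mx => mx
  | c :: t, cur, mx =>
    if c = 'C' ∨ c = 'F' then countLoop t 0 mx
    else countLoop t (cur + 1) (max (cur + 1) mx)

def count (string : String) : Int := countLoop string.toList 0 0

-- ===== PORT B =====
-- max(map(len, string.replace('F','C').split('C'))); split('C') always yields a
-- nonempty list, so Python's max never sees an empty iterable and max? is always some.
def count_alt (string : String) : Int :=
  let parts := PySem.Chars.splitOn (PySem.Chars.replace string.toList ['F'] ['C']) ['C']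
  (PySem.List.max? (parts.map (fun p => (PySem.Chars.len p : Int))) (fun x => x)).getD 0

-- ===== PRECONDITION & SPEC =====
def Spec_count (string : String) (out : Int) : Prop := out = count_alt string
instance (string : String) (out : Int) : Decidable (Spec_count string out) := by unfold Spec_count; infer_instance

-- ===== CLAIM (what is proved, stated in full; the proofs are below) =====
def Claim_equal_count : Prop := ∀ (string : String), Dom_count string → Spec_count string (count string)

-- ===== LEMMAS AND PROOFS =====

-- proof-side spec helpers
def fCF (c : Char) : Char := if c = 'F' then 'C' else c

-- the maximal 'C'-free segments of a list, in order (always nonempty)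
def segsC : List Char → List (List Char)
  | [] => [[]]
  | c :: t => if c = 'C' then [] :: segsC t
              else match segsC t with
                   | s :: r => (c :: s) :: r
                   | [] => [[]]

-- the lengths of the maximal C/F-free segments
def segLens : List Char → List Int
  | [] => [0]
  | c :: t => if c = 'C' ∨ c = 'F' then 0 :: segLens t
              else match segLens t with
                   | x :: r => (x + 1) :: r
                   | [] => []

theorem segsC_ne_nil (l : List Char) : segsC l ≠ [] := by
  cases l with
  | nil => simp [segsC]
  | cons c t =>
    simp only [segsC]
    split
    · simp
    · split <;> simp

theorem segLens_ne_nil (l : List Char) : segLens l ≠ [] := by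
  induction l with
  | nil => simp [segLens]
  | cons c t ih =>
    simp only [segLens]
    split
    · simp
    · cases h : segLens t with
      | nil => exact absurd h ih
      | cons x r => simp

theorem segLens_nonneg (l : List Char) : ∀ x ∈ segLens l, 0 ≤ x := by
  induction l with
  | nil => simp [segLens]
  | cons c t ih =>
    simp only [segLens]
    split
    · intro x hx
      rcases List.mem_cons.1 hx with h | h
      · omega
      · exact ih x h
    · cases h : segLens t with
      | nil => simp
      | cons y r =>
        intro x hx
        rcases List.mem_cons.1 hx with h' | h'
        · have := ih y (by simp [h])
          omega
        · exact ih x (by simp [h, h'])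

-- replace with single-char old/new is a map
theorem replace_go_char (l : List Char) : ∀ (acc : List Char) (fuel : Nat),
    l.length ≤ fuel →
    PySem.Chars.replace.go ['F'] ['C'] fuel l acc = acc.reverse ++ l.map fCF := by
  induction l with
  | nil =>
    intro acc fuel _
    cases fuel <;> simp [PySem.Chars.replace.go]
  | cons c t ih =>
    intro acc fuel hf
    cases fuel with
    | zero => simp at hf
    | succ f =>
      simp only [PySem.Chars.replace.go]
      by_cases hc : c = 'F'
      · subst hc
        rw [if_pos (by simp [List.isPrefixOf])]
        rw [show List.drop (['F'] : List Char).length ('F' :: t) = t from rfl]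
        rw [ih _ f (by simpa using hf)]
        simp [fCF]
      · rw [if_neg (by simp [List.isPrefixOf]; exact fun h => hc h.symm)]
        rw [ih _ f (by simpa using hf)]
        simp [fCF, hc]

theorem replace_char (l : List Char) :
    PySem.Chars.replace l ['F'] ['C'] = l.map fCF := by
  simp only [PySem.Chars.replace]
  rw [if_neg (by simp)]
  simpa using replace_go_char l [] l.length le_rfl

-- splitOn with a single-char separator computes segsC
theorem splitOn_go_char (l : List Char) : ∀ (cur : List Char) (acc : List (List Char)) (fuel : Nat),
    l.length < fuel →
    PySem.Chars.splitOn.go ['C'] fuel l cur acc =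
      acc.reverse ++ (cur.reverse ++ (segsC l).headD []) :: (segsC l).tail := by
  induction l with
  | nil =>
    intro cur acc fuel hf
    cases fuel with
    | zero => omega
    | succ f => simp [PySem.Chars.splitOn.go, segsC]

  | cons c t ih =>
    intro cur acc fuel hf
    cases fuel with
    | zero => omega
    | succ f =>
      simp only [PySem.Chars.splitOn.go]
      by_cases hc : c = 'C'
      · subst hc
        rw [if_pos (by simp [List.isPrefixOf])]
        rw [show List.drop (['C'] : List Char).length ('C' :: t) = t from rfl]
        rw [ih [] (cur.reverse :: acc) f (by simp at hf; omega)]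
        cases hK : segsC t with
        | nil => exact absurd hK (segsC_ne_nil t)
        | cons s r => simp [segsC, hK]
      · rw [if_neg (by simp [List.isPrefixOf]; exact fun h => hc h.symm)]
        rw [ih (c :: cur) acc f (by simp at hf; omega)]
        simp only [segsC, if_neg hc]
        cases h : segsC t with
        | nil => exact absurd h (segsC_ne_nil t)
        | cons s r => simp

theorem splitOn_char (l : List Char) :
    PySem.Chars.splitOn l ['C'] = segsC l := by
  simp only [PySem.Chars.splitOn]
  rw [splitOn_go_char l [] [] (l.length + 1) (by omega)]
  cases h : segsC l with
  | nil => exact absurd h (segsC_ne_nil l)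
  | cons s r => simp

-- splitting the F→C-mapped list on 'C' gives exactly the C/F-segment lengths
theorem segsC_map_len (l : List Char) :
    (segsC (l.map fCF)).map (fun p => (p.length : Int)) = segLens l := by
  induction l with
  | nil => simp [segsC, segLens]
  | cons c t ih =>
    by_cases hc : c = 'C' ∨ c = 'F'
    · have hf : fCF c = 'C' := by rcases hc with h | h <;> simp [fCF, h]
      simp [segsC, segLens, hf, hc, ih]
    · have hc1 : ¬ c = 'C' := fun h => hc (Or.inl h)
      have hc2 : ¬ c = 'F' := fun h => hc (Or.inr h)
      have hf : fCF c = c := by simp [fCF, hc2]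
      have hc' : ¬ fCF c = 'C' := by simp [hf, hc1]
      simp only [List.map_cons, segsC, if_neg hc', segLens, if_neg hc]
      cases h : segsC (t.map fCF) with
      | nil => exact absurd h (segsC_ne_nil _)
      | cons s r =>
        rw [h] at ih
        cases h2 : segLens t with
        | nil => exact absurd h2 (segLens_ne_nil t)
        | cons x r2 =>
          rw [h2] at ih
          simp only [List.map_cons] at ih ⊢
          injection ih with ih1 ih2
          simp [ih2]
          omega

theorem foldl_max_shift (r : List Int) : ∀ (a b : Int),
    r.foldl max (max a b) = max a (r.foldl max b) := by
  induction r with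
  | nil => intro a b; simp
  | cons x t ih =>
    intro a b
    simp only [List.foldl]
    rw [max_assoc, ih]

-- A's loop computes the max over mx and the remaining segment lengths (first one offset by cur)
theorem countLoop_eq (l : List Char) : ∀ (cur mx : Int), 0 ≤ cur → cur ≤ mx →
    countLoop l cur mx =
      max mx (max (cur + (segLens l).headD 0) ((segLens l).tail.foldl max 0)) := by
  induction l with
  | nil =>
    intro cur mx h0 h1
    simp only [countLoop, segLens, List.headD, List.tail, List.foldl]
    omega
  | cons c t ih =>
    intro cur mx h0 h1
    by_cases hc : c = 'C' ∨ c = 'F'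
    · simp only [countLoop, if_pos hc, segLens]
      rw [ih 0 mx le_rfl (by omega)]
      cases h : segLens t with
      | nil => exact absurd h (segLens_ne_nil t)
      | cons x r =>
        simp only [List.headD, List.tail, List.foldl]
        rw [max_comm 0 x, foldl_max_shift r x 0]
        omega
    · simp only [countLoop, if_neg hc, segLens]
      rw [ih (cur + 1) (max (cur + 1) mx) (by omega) (le_max_left _ _)]
      cases h : segLens t with
      | nil => exact absurd h (segLens_ne_nil t)
      | cons x r =>
        have hx : 0 ≤ x := segLens_nonneg t x (by simp [h])
        simp only [List.headD, List.tail]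
        omega

-- ===== VERDICT (by name: the statement is the Claim_ definition above) =====
theorem count_spec : Claim_equal_count := by
  intro s _
  unfold Spec_count count count_alt
  rw [replace_char, splitOn_char]
  rw [countLoop_eq s.toList 0 0 le_rfl le_rfl]
  cases h2 : segLens s.toList with
  | nil => exact absurd h2 (segLens_ne_nil _)
  | cons x r =>
    have hmap := segsC_map_len s.toList
    have hx : 0 ≤ x := segLens_nonneg s.toList x (by simp [h2])
    cases h : segsC (s.toList.map fCF) with
    | nil => exact absurd h (segsC_ne_nil _)
    | cons p ps =>
      rw [h, h2] at hmap
      simp only [List.map_cons] at hmap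
      injection hmap with hm1 hm2
      simp only [List.headD, List.tail]
      simp only [List.map_cons]
      rw [PySem.List.max?_id_cons]
      simp only [Option.getD_some]
      simp only [PySem.Chars.len]
      have hlen : (ps.map (fun q => ((q.length : Nat) : Int))) = r := by
        simpa using hm2
      have hhd : ((p.length : Nat) : Int) = x := by simpa using hm1
      rw [hhd, hlen]
      have hfold : List.foldl max x r = max x (List.foldl max 0 r) := by
        have h3 := foldl_max_shift r x 0
        rwa [max_eq_left hx] at h3
      omega
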